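-- pv_equiv track=rewrite | github.com/aarabdh/AWS-Management-Suite | S3script.py | untagged_buckets
-- ===== SOURCE A (Python) =====
-- from collections import defaultdict
--
-- def untagged_buckets(bucket_tags):
--     untagged_buckets = defaultdict(list)
--     for key, value in bucket_tags.items():
--         req_tags = ["team", "environment", "project", "maintainer"]
--         for i in value:
--             if i['Key'] in req_tags:
--                 req_tags.remove(i['Key'])
--         untagged_buckets[key] = req_tags
--     return untagged_buckets
-- ===== SOURCE B (Python) =====
-- from collections import defaultdict
--
-- REQ_TAGS = ("team", "environment", "project", "maintainer")
--
-- def untagged_buckets(bucket_tags):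
--     result = defaultdict(list)
--     for key, value in bucket_tags.items():
--         present = {i['Key'] for i in value}
--         result[key] = [t for t in REQ_TAGS if t not in present]
--     return result
-- ===== Notes on version B (the rewrite author's own statement) =====
-- stated objective: idiomatic
-- what changed: Instead of mutating the required-tag list with remove() while scanning the bucket's tag dicts, B builds a set of the keys present once and filters the fixed required-tag tuple; the inner membership-and-remove pass over a shrinking list disappears.
import Mathlib
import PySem

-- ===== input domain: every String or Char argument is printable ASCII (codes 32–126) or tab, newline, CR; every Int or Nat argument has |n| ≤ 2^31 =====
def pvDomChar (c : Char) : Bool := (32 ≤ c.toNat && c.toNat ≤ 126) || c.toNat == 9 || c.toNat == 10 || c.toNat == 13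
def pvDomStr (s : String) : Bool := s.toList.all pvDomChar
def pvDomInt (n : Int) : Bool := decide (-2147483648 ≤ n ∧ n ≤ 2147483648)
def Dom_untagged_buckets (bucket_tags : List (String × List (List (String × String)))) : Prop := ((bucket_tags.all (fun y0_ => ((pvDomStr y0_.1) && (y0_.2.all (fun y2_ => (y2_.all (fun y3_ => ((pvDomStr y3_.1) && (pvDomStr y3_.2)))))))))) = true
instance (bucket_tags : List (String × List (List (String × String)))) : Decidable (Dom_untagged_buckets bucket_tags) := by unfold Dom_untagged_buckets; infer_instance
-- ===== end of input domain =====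

-- B replaces A's membership-test-and-remove mutation of the required-tag list with a
-- present-key set built once, then a filter of the fixed required list (idiomatic rewrite).

-- i['Key'] for an inner tag dict; getD "" is reached only on a missing 'Key'
-- (Python KeyError), which Pre_untagged_buckets excludes.
def pvKeyOf (i : List (String × String)) : String :=
  (PySem.Dict.mk i).getD "Key" ""

-- ===== PORT A =====
def untagged_buckets (bucket_tags : List (String × List (List (String × String)))) : List (String × List String) :=
  (bucket_tags.foldl (fun acc kv =>
      let req_tags := kv.2.foldl (fun req_tags i =>
          if req_tags.contains (pvKeyOf i) then
            (PySem.List.remove? req_tags (pvKeyOf i)).getD req_tags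
          else req_tags)
        ["team", "environment", "project", "maintainer"]
      acc.insert kv.1 req_tags)
    PySem.Dict.empty).items

-- ===== PORT B =====
def untagged_buckets_alt (bucket_tags : List (String × List (List (String × String)))) : List (String × List String) :=
  (bucket_tags.foldl (fun acc kv =>
      let present : PySem.Set String := PySem.Set.ofList (kv.2.map pvKeyOf)
      acc.insert kv.1
        (["team", "environment", "project", "maintainer"].filter
          (fun t => !(PySem.Set.contains present t))))
    PySem.Dict.empty).items

-- ===== PRECONDITION & SPEC =====
-- Pre_: every inner tag dict has a 'Key' entry; on a dict without one, A (and B) raise KeyError.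
def Pre_untagged_buckets (bucket_tags : List (String × List (List (String × String)))) : Prop :=
  (bucket_tags.all (fun kv => kv.2.all (fun i => i.any (fun p => p.1 == "Key")))) = true
instance (bucket_tags : List (String × List (List (String × String)))) : Decidable (Pre_untagged_buckets bucket_tags) := by unfold Pre_untagged_buckets; infer_instance

def pvWitness_untagged_buckets : (List (String × List (List (String × String)))) :=
  [("b1", [[("Key", "team"), ("Value", "x")]]), ("b2", [])]

def Spec_untagged_buckets (bucket_tags : List (String × List (List (String × String)))) (out : List (String × List String)) : Prop := out = untagged_buckets_alt bucket_tags
instance (bucket_tags : List (String × List (List (String × String)))) (out : List (String × List String)) : Decidable (Spec_untagged_buckets bucket_tags out) := by unfold Spec_untagged_buckets; infer_instance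

-- ===== CLAIM (what is proved, stated in full; the proofs are below) =====
def Claim_equal_untagged_buckets : Prop := ∀ (bucket_tags : List (String × List (List (String × String)))), Dom_untagged_buckets bucket_tags → Pre_untagged_buckets bucket_tags → Spec_untagged_buckets bucket_tags (untagged_buckets bucket_tags)

-- ===== LEMMAS AND PROOFS =====

-- A's inner membership-guarded remove loop computes the filter B computes, for any
-- duplicate-free starting list of required tags.
theorem inner_loop_eq_filter (vs : List (List (String × String))) :
    ∀ (req : List String), req.Nodup →
      vs.foldl (fun req_tags i =>
          if req_tags.contains (pvKeyOf i) then
            (PySem.List.remove? req_tags (pvKeyOf i)).getD req_tags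
          else req_tags) req
        = req.filter (fun t => !((vs.map pvKeyOf).contains t)) := by
  induction vs with
  | nil => intro req _; simp
  | cons i vs ih =>
    intro req hnd
    simp only [List.foldl_cons, List.map_cons]
    by_cases hk : pvKeyOf i ∈ req
    · rw [if_pos (by simpa using hk), PySem.List.remove?_eq_some_erase req (pvKeyOf i) hk,
        Option.getD_some, ih _ (hnd.erase (pvKeyOf i)), hnd.erase_eq_filter]
      rw [List.filter_filter]
      apply List.filter_congr
      intro t _
      by_cases htk : t = pvKeyOf i <;> simp [htk]
    · rw [if_neg (by simpa using hk), ih _ hnd]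
      apply List.filter_congr
      intro t ht
      have : t ≠ pvKeyOf i := fun h => hk (h ▸ ht)
      simp [this]

-- one bucket: A's remove loop over the tag dicts equals B's filter by the present-key set
theorem bucket_eq (value : List (List (String × String))) :
    value.foldl (fun req_tags i =>
        if req_tags.contains (pvKeyOf i) then
          (PySem.List.remove? req_tags (pvKeyOf i)).getD req_tags
        else req_tags) ["team", "environment", "project", "maintainer"]
      = ["team", "environment", "project", "maintainer"].filter
          (fun t => !(PySem.Set.contains (PySem.Set.ofList (value.map pvKeyOf)) t)) := by
  rw [inner_loop_eq_filter _ _ (by decide)]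
  apply List.filter_congr
  intro t _
  simp [PySem.Set.mem_ofList]

theorem untagged_buckets_spec' (bucket_tags : List (String × List (List (String × String)))) :
    untagged_buckets bucket_tags = untagged_buckets_alt bucket_tags := by
  unfold untagged_buckets untagged_buckets_alt
  congr 2
  funext acc kv
  exact congrArg (acc.insert kv.1) (bucket_eq kv.2)

-- ===== VERDICT (by name: the statement is the Claim_ definition above) =====
theorem untagged_buckets_spec : Claim_equal_untagged_buckets := by
  intro bt _ _
  exact untagged_buckets_spec' bt
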